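-- pv_equiv track=rewrite | github.com/ellipakbaz-pixel/rag | chunk_enricher.py | _paths_match_by_suffix
-- ===== SOURCE A (Python) =====
-- def _paths_match_by_suffix(path1: str, path2: str) -> bool:
--     """
--     Check if two paths match by comparing their suffixes.
--
--     This handles cases where paths have different root directories
--     but refer to the same file.
--
--     Args:
--         path1: First path (normalized with forward slashes)
--         path2: Second path (normalized with forward slashes)
--
--     Returns:
--         True if paths match by suffix, False otherwise.
--     """
--     if not path1 or not path2:
--         return False
--
--     # Split paths into components
--     parts1 = path1.split('/')
--     parts2 = path2.split('/')
--
--     # Compare from the end (filename first)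
--     min_len = min(len(parts1), len(parts2))
--     if min_len == 0:
--         return False
--
--     # At minimum, filenames must match
--     if parts1[-1] != parts2[-1]:
--         return False
--
--     # Check how many trailing components match
--     matching = 0
--     for i in range(1, min_len + 1):
--         if parts1[-i] == parts2[-i]:
--             matching += 1
--         else:
--             break
--
--     # Require at least filename match (1 component)
--     # For better accuracy, require at least 2 matching components if both paths have 2+ parts
--     if min_len >= 2:
--         return matching >= 2
--     return matching >= 1
-- ===== SOURCE B (Python) =====
-- def _paths_match_by_suffix(path1: str, path2: str) -> bool:
--     if not path1 or not path2:
--         return False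
--     parts1 = path1.split('/')
--     parts2 = path2.split('/')
--     n = min(len(parts1), len(parts2), 2)
--     return parts1[-n:] == parts2[-n:]
-- ===== Notes on version B (the rewrite author's own statement) =====
-- stated objective: simpler
-- what changed: Replaces the counting loop over trailing components and the separate filename pre-check by a single suffix-slice comparison parts1[-n:] == parts2[-n:] with n = min(len(parts1), len(parts2), 2).
import Mathlib
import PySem

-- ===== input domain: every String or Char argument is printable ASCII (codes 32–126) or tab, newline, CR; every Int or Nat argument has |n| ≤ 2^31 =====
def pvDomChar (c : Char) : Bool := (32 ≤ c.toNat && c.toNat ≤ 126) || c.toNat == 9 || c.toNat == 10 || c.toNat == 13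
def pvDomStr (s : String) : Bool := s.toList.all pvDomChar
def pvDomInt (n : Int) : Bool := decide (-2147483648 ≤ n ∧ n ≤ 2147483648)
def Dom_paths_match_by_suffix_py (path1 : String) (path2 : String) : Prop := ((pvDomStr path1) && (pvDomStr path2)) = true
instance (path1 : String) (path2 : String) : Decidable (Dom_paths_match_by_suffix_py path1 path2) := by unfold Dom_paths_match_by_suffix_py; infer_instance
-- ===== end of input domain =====

-- B replaces A's counting loop over trailing components by a single suffix-slice
-- comparison parts[-n:] with n = min(len1, len2, 2) (objective: simpler).

-- ===== PORT A =====
-- the `for i in range(1, min_len+1): if parts1[-i] == parts2[-i]: matching += 1 else: break` loop;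
-- i stays in [1, min_len], so parts[-i] never raises and the Option equality below is Python's equality
def pvLoopA (l1 l2 : List (List Char)) : List Int → Nat → Nat
  | [], matching => matching
  | i :: rest, matching =>
    if PySem.List.pyGet? l1 (-i) = PySem.List.pyGet? l2 (-i)
    then pvLoopA l1 l2 rest (matching + 1)
    else matching

-- path.split('/') is ported as PySem.Chars.splitOn path.toList ['/'] (exact: the separator is nonempty)
def paths_match_by_suffix_py (path1 : String) (path2 : String) : Bool :=
  if path1.toList = [] ∨ path2.toList = [] then false
  else
    let parts1 := PySem.Chars.splitOn path1.toList ['/']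
    let parts2 := PySem.Chars.splitOn path2.toList ['/']
    let min_len := min parts1.length parts2.length
    if min_len = 0 then false
    else if PySem.List.pyGet? parts1 (-1) ≠ PySem.List.pyGet? parts2 (-1) then false
    else
      let matching := pvLoopA parts1 parts2 (PySem.List.pyRange 1 ((min_len : Int) + 1) 1) 0
      if 2 ≤ min_len then decide (2 ≤ matching) else decide (1 ≤ matching)

-- ===== PORT B =====
def paths_match_by_suffix_py_alt (path1 : String) (path2 : String) : Bool :=
  if path1.toList = [] ∨ path2.toList = [] then false
  else
    let parts1 := PySem.Chars.splitOn path1.toList ['/']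
    let parts2 := PySem.Chars.splitOn path2.toList ['/']
    let n := min (min parts1.length parts2.length) 2
    decide (PySem.List.slice parts1 (some (-(n : Int))) none
          = PySem.List.slice parts2 (some (-(n : Int))) none)

-- ===== PRECONDITION & SPEC =====
def Spec_paths_match_by_suffix_py (path1 : String) (path2 : String) (out : Bool) : Prop := out = paths_match_by_suffix_py_alt path1 path2
instance (path1 : String) (path2 : String) (out : Bool) : Decidable (Spec_paths_match_by_suffix_py path1 path2 out) := by unfold Spec_paths_match_by_suffix_py; infer_instance

-- ===== CLAIM (what is proved, stated in full; the proofs are below) =====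
def Claim_equal_paths_match_by_suffix_py : Prop := ∀ (path1 : String) (path2 : String), Dom_paths_match_by_suffix_py path1 path2 → Spec_paths_match_by_suffix_py path1 path2 (paths_match_by_suffix_py path1 path2)

-- ===== LEMMAS AND PROOFS =====

-- splitOn.go always outputs strictly more pieces than it was handed
lemma pvGo_lt (sep : List Char) : ∀ (fuel : Nat) (l cur : List Char) (acc : List (List Char)),
    acc.length < (PySem.Chars.splitOn.go sep fuel l cur acc).length := by
  intro fuel
  induction fuel with
  | zero => intro l cur acc; simp [PySem.Chars.splitOn.go]
  | succ n ih =>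
    intro l cur acc
    cases l with
    | nil => simp [PySem.Chars.splitOn.go]
    | cons c rest =>
      rw [PySem.Chars.splitOn.go]
      split_ifs with h
      · exact lt_trans (by simp) (ih _ _ (cur.reverse :: acc))
      · exact ih _ _ acc

-- str.split always yields at least one piece
lemma pvSplitOn_ne_nil (s sep : List Char) : PySem.Chars.splitOn s sep ≠ [] := by
  intro h
  have := pvGo_lt sep (s.length + 1) s [] []
  rw [PySem.Chars.splitOn] at h
  simp [h] at this

-- the break-loop never decreases its accumulator
lemma pvLoopA_le (l1 l2 : List (List Char)) : ∀ (r : List Int) (m : Nat), m ≤ pvLoopA l1 l2 r m := by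
  intro r
  induction r with
  | nil => intro m; simp [pvLoopA]
  | cons i rest ih =>
    intro m
    simp only [pvLoopA]
    split_ifs with h
    · exact le_trans (Nat.le_succ m) (ih (m + 1))
    · exact le_refl m

-- the heart of the equivalence, on the (always nonempty) component lists
lemma pv_core (l1 l2 : List (List Char)) (h1 : l1 ≠ []) (h2 : l2 ≠ []) :
    (if min l1.length l2.length = 0 then false
     else if PySem.List.pyGet? l1 (-1) ≠ PySem.List.pyGet? l2 (-1) then false
     else if 2 ≤ min l1.length l2.length then
       decide (2 ≤ pvLoopA l1 l2 (PySem.List.pyRange 1 (((min l1.length l2.length : Nat) : Int) + 1) 1) 0)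
     else decide (1 ≤ pvLoopA l1 l2 (PySem.List.pyRange 1 (((min l1.length l2.length : Nat) : Int) + 1) 1) 0))
  = decide (PySem.List.slice l1 (some (-((min (min l1.length l2.length) 2 : Nat) : Int))) none
          = PySem.List.slice l2 (some (-((min (min l1.length l2.length) 2 : Nat) : Int))) none) := by
  have hn1 : 0 < l1.length := List.length_pos_of_ne_nil h1
  have hn2 : 0 < l2.length := List.length_pos_of_ne_nil h2
  rw [if_neg (by omega)]
  by_cases h2m : 2 ≤ min l1.length l2.length
  · have hl1 : 2 ≤ l1.length := by omega
    have hl2 : 2 ≤ l2.length := by omega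
    have hmin2 : min (min l1.length l2.length) 2 = 2 := by omega
    rw [hmin2]
    have hb1 : PySem.List.slice l1 (some (-((2 : Nat) : Int))) none = l1.drop (l1.length - 2) :=
      PySem.List.slice_from_neg_natCast l1 2 (by norm_num)
    have hb2 : PySem.List.slice l2 (some (-((2 : Nat) : Int))) none = l2.drop (l2.length - 2) :=
      PySem.List.slice_from_neg_natCast l2 2 (by norm_num)
    have hd1 : l1.drop (l1.length - 2) = [l1[l1.length - 2]'(by omega), l1[l1.length - 1]'(by omega)] := by
      rw [List.drop_eq_getElem_cons (by omega)]
      have e1 : l1.length - 2 + 1 = l1.length - 1 := by omega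
      rw [e1, List.drop_eq_getElem_cons (by omega)]
      have e2 : l1.length - 1 + 1 = l1.length := by omega
      rw [e2, List.drop_length]
    have hd2 : l2.drop (l2.length - 2) = [l2[l2.length - 2]'(by omega), l2[l2.length - 1]'(by omega)] := by
      rw [List.drop_eq_getElem_cons (by omega)]
      have e1 : l2.length - 2 + 1 = l2.length - 1 := by omega
      rw [e1, List.drop_eq_getElem_cons (by omega)]
      have e2 : l2.length - 1 + 1 = l2.length := by omega
      rw [e2, List.drop_length]
    have hg1 : PySem.List.pyGet? l1 (-1) = some (l1[l1.length - 1]'(by omega)) := by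
      rw [PySem.List.pyGet?_neg_one, List.getLast?_eq_getElem?, List.getElem?_eq_getElem (by omega)]
    have hg2 : PySem.List.pyGet? l2 (-1) = some (l2[l2.length - 1]'(by omega)) := by
      rw [PySem.List.pyGet?_neg_one, List.getLast?_eq_getElem?, List.getElem?_eq_getElem (by omega)]
    have hgg1 : PySem.List.pyGet? l1 (-2) = some (l1[l1.length - 2]'(by omega)) := by
      rw [PySem.List.pyGet?_neg_ofNat l1 2 (by omega) (by omega), List.getElem?_eq_getElem (by omega)]
    have hgg2 : PySem.List.pyGet? l2 (-2) = some (l2[l2.length - 2]'(by omega)) := by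
      rw [PySem.List.pyGet?_neg_ofNat l2 2 (by omega) (by omega), List.getElem?_eq_getElem (by omega)]
    have hr : PySem.List.pyRange 1 (((min l1.length l2.length : Nat) : Int) + 1) 1
            = 1 :: 2 :: PySem.List.pyRange 3 (((min l1.length l2.length : Nat) : Int) + 1) 1 := by
      rw [PySem.List.pyRange_one_cons (by push_cast; omega)]
      norm_num
      rw [PySem.List.pyRange_one_cons (by omega)]
      norm_num
    rw [hb1, hb2, hd1, hd2, hr]
    by_cases hlast : l1[l1.length - 1]'(by omega) = l2[l2.length - 1]'(by omega)
    · rw [if_neg (by simp [hg1, hg2, hlast])]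
      rw [if_pos h2m]
      by_cases hsec : l1[l1.length - 2]'(by omega) = l2[l2.length - 2]'(by omega)
      · have hL : 2 ≤ pvLoopA l1 l2 (1 :: 2 :: PySem.List.pyRange 3 (min (l1.length : Int) (l2.length : Int) + 1) 1) 0 := by
          simp only [pvLoopA, hg1, hg2, hgg1, hgg2, hlast, hsec, if_true]
          exact pvLoopA_le l1 l2 _ 2
        simp [hL, hlast, hsec]
      · have hL : pvLoopA l1 l2 (1 :: 2 :: PySem.List.pyRange 3 (min (l1.length : Int) (l2.length : Int) + 1) 1) 0 = 1 := by
          simp [pvLoopA, hg1, hg2, hgg1, hgg2, hlast, hsec]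
        simp [hL, hsec]
    · rw [if_pos (by simp [hg1, hg2, hlast])]
      simp [hlast]
  · have hm1 : min l1.length l2.length = 1 := by omega
    have hmin1 : min (min l1.length l2.length) 2 = 1 := by omega
    rw [hmin1, hm1]
    rw [if_neg (by norm_num : ¬ (2 : Nat) ≤ 1)]
    have hb1 : PySem.List.slice l1 (some (-((1 : Nat) : Int))) none = l1.drop (l1.length - 1) :=
      PySem.List.slice_from_neg_natCast l1 1 (by norm_num)
    have hb2 : PySem.List.slice l2 (some (-((1 : Nat) : Int))) none = l2.drop (l2.length - 1) :=
      PySem.List.slice_from_neg_natCast l2 1 (by norm_num)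
    have hd1 : l1.drop (l1.length - 1) = [l1[l1.length - 1]'(by omega)] := by
      rw [List.drop_eq_getElem_cons (by omega)]
      have e : l1.length - 1 + 1 = l1.length := by omega
      rw [e, List.drop_length]
    have hd2 : l2.drop (l2.length - 1) = [l2[l2.length - 1]'(by omega)] := by
      rw [List.drop_eq_getElem_cons (by omega)]
      have e : l2.length - 1 + 1 = l2.length := by omega
      rw [e, List.drop_length]
    have hg1 : PySem.List.pyGet? l1 (-1) = some (l1[l1.length - 1]'(by omega)) := by
      rw [PySem.List.pyGet?_neg_one, List.getLast?_eq_getElem?, List.getElem?_eq_getElem (by omega)]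
    have hg2 : PySem.List.pyGet? l2 (-1) = some (l2[l2.length - 1]'(by omega)) := by
      rw [PySem.List.pyGet?_neg_one, List.getLast?_eq_getElem?, List.getElem?_eq_getElem (by omega)]
    have hr : PySem.List.pyRange 1 (((1 : Nat) : Int) + 1) 1 = [1] := by decide
    rw [hb1, hb2, hd1, hd2, hr]
    by_cases hlast : l1[l1.length - 1]'(by omega) = l2[l2.length - 1]'(by omega)
    · rw [if_neg (by simp [hg1, hg2, hlast])]
      simp [pvLoopA, hg1, hg2, hlast]
    · rw [if_pos (by simp [hg1, hg2, hlast])]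
      simp [hlast]

-- ===== VERDICT (by name: the statement is the Claim_ definition above) =====
theorem paths_match_by_suffix_py_spec : Claim_equal_paths_match_by_suffix_py := by
  intro path1 path2 _
  unfold Spec_paths_match_by_suffix_py
  simp only [paths_match_by_suffix_py, paths_match_by_suffix_py_alt]
  by_cases hG : path1.toList = [] ∨ path2.toList = []
  · rw [if_pos hG, if_pos hG]
  · rw [if_neg hG, if_neg hG]
    exact pv_core _ _ (pvSplitOn_ne_nil _ _) (pvSplitOn_ne_nil _ _)
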